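-- pv_equiv track=rewrite | github.com/LaurentOngaro/FabAssetsManager | lib/routes.py | _build_facets
-- ===== SOURCE A (Python) =====
-- from typing import Any
--
-- def _split_csv_field(value: Any) -> list[str]:
--     return [part.strip() for part in str(value or "").split(",") if part.strip()]
--
-- def _build_facets(flat_assets: list[dict[str, Any]]) -> dict[str, dict[str, int]]:
--     facets = {"engines": {}, "licenses": {}, "formats": {}, "sellers": {}, "types": {}, "ue_max": {}, }
--
--     for asset in flat_assets:
--         for engine in _split_csv_field(asset.get("engine_versions")):
--             facets["engines"][engine] = facets["engines"].get(engine, 0) + 1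
--         for license_name in _split_csv_field(asset.get("licenses")):
--             facets["licenses"][license_name] = facets["licenses"].get(license_name, 0) + 1
--         for format_name in _split_csv_field(asset.get("asset_formats")):
--             facets["formats"][format_name] = facets["formats"].get(format_name, 0) + 1
--
--         seller_name = str(asset.get("seller_name") or "").strip()
--         if seller_name:
--             facets["sellers"][seller_name] = facets["sellers"].get(seller_name, 0) + 1
--
--         listing_type = str(asset.get("listing_type") or "").strip()
--         if listing_type:
--             facets["types"][listing_type] = facets["types"].get(listing_type, 0) + 1
--
--         ue_max = str(asset.get("ue_max") or "").strip()
--         if ue_max: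
--             facets["ue_max"][ue_max] = facets["ue_max"].get(ue_max, 0) + 1
--
--     return facets
-- ===== SOURCE B (Python) =====
-- from typing import Any
--
-- def _split_csv_field(value: Any) -> list[str]:
--     return [part.strip() for part in str(value or "").split(",") if part.strip()]
--
-- _FACET_SPEC = [
--     ("engines", "engine_versions", True),
--     ("licenses", "licenses", True),
--     ("formats", "asset_formats", True),
--     ("sellers", "seller_name", False),
--     ("types", "listing_type", False),
--     ("ue_max", "ue_max", False),
-- ]
--
-- def _extract(asset: dict, key: str, is_csv: bool) -> list[str]:
--     if is_csv:
--         return _split_csv_field(asset.get(key))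
--     value = str(asset.get(key) or "").strip()
--     return [value] if value else []
--
-- def _tally(values) -> dict:
--     counts = {}
--     for v in values:
--         counts[v] = counts.get(v, 0) + 1
--     return counts
--
-- def _build_facets(flat_assets: list) -> dict:
--     return {
--         facet: _tally(v for asset in flat_assets for v in _extract(asset, key, is_csv))
--         for facet, key, is_csv in _FACET_SPEC
--     }
-- ===== Notes on version B (the rewrite author's own statement) =====
-- stated objective: alternative
-- what changed: Replaces A's single pass that increments six parallel dicts per asset with a table-driven transposed pass: one (facet, key, is_csv) spec table, a generic extractor, and per facet one flattened value stream tallied by a single generic counting helper.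
import Mathlib
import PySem

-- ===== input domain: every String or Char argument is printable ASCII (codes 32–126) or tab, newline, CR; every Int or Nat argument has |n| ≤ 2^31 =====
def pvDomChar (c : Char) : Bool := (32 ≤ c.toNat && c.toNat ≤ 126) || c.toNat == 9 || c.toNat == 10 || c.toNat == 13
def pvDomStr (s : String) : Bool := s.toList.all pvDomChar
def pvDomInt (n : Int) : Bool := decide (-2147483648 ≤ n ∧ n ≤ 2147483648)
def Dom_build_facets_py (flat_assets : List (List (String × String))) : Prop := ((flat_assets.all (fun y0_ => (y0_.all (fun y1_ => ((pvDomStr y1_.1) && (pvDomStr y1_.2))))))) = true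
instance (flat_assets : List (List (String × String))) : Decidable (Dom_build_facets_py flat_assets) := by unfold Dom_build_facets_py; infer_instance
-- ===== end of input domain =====

-- B re-derives the same facet counts via a (facet, key, is_csv) spec table with a generic extractor and one generic tally helper,
-- one flattened value stream per facet (assets inner, facets outer), instead of A's single pass incrementing six dicts; same cost, alternative decomposition.



-- ===== PORT A =====
-- helper _split_csv_field (shared by A and B in the Python module)
def pvSplitCsv (value : String) : List String :=
  (((PySem.Str.split? value ",").getD []).filter (fun part => PySem.Str.strip part ≠ "")).map PySem.Str.strip

-- facets[name][x] = facets[name].get(x, 0) + 1  (read-modify-write of the inner dict)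
def pvBump (facets : PySem.Dict String (PySem.Dict String Int)) (name x : String) :
    PySem.Dict String (PySem.Dict String Int) :=
  facets.insert name
    ((facets.getD name PySem.Dict.empty).insert x
      ((facets.getD name PySem.Dict.empty).getD x 0 + 1))

-- the body of A's "for asset in flat_assets" loop
def pvStepA (facets : PySem.Dict String (PySem.Dict String Int)) (asset : List (String × String)) :
    PySem.Dict String (PySem.Dict String Int) :=
  let facets := (pvSplitCsv ((PySem.Dict.mk asset).getD "engine_versions" "")).foldl
      (fun fac engine => pvBump fac "engines" engine) facets
  let facets := (pvSplitCsv ((PySem.Dict.mk asset).getD "licenses" "")).foldl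
      (fun fac license_name => pvBump fac "licenses" license_name) facets
  let facets := (pvSplitCsv ((PySem.Dict.mk asset).getD "asset_formats" "")).foldl
      (fun fac format_name => pvBump fac "formats" format_name) facets
  let seller_name := PySem.Str.strip ((PySem.Dict.mk asset).getD "seller_name" "")
  let facets := if seller_name ≠ "" then pvBump facets "sellers" seller_name else facets
  let listing_type := PySem.Str.strip ((PySem.Dict.mk asset).getD "listing_type" "")
  let facets := if listing_type ≠ "" then pvBump facets "types" listing_type else facets
  let ue_max := PySem.Str.strip ((PySem.Dict.mk asset).getD "ue_max" "")
  let facets := if ue_max ≠ "" then pvBump facets "ue_max" ue_max else facets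
  facets

def build_facets_py (flat_assets : List (List (String × String))) : List (String × List (String × Int)) :=
  ((flat_assets.foldl pvStepA
      (PySem.Dict.mk [("engines", PySem.Dict.empty), ("licenses", PySem.Dict.empty),
        ("formats", PySem.Dict.empty), ("sellers", PySem.Dict.empty),
        ("types", PySem.Dict.empty), ("ue_max", PySem.Dict.empty)])).items).map
    (fun p => (p.1, p.2.items))

-- ===== PORT B =====
-- the (facet, source key, is_csv) spec table
def pvFacetSpec : List (String × String × Bool) :=
  [("engines", "engine_versions", true), ("licenses", "licenses", true),
   ("formats", "asset_formats", true), ("sellers", "seller_name", false),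
   ("types", "listing_type", false), ("ue_max", "ue_max", false)]

def pvExtract (asset : List (String × String)) (key : String) (isCsv : Bool) : List String :=
  if isCsv then pvSplitCsv ((PySem.Dict.mk asset).getD key "")
  else
    let value := PySem.Str.strip ((PySem.Dict.mk asset).getD key "")
    if value ≠ "" then [value] else []

def pvTallyB (values : List String) : PySem.Dict String Int :=
  values.foldl (fun counts v => counts.insert v (counts.getD v 0 + 1)) PySem.Dict.empty

def build_facets_py_alt (flat_assets : List (List (String × String))) : List (String × List (String × Int)) :=
  pvFacetSpec.map (fun spec =>
    (spec.1, (pvTallyB (flat_assets.flatMap (fun asset => pvExtract asset spec.2.1 spec.2.2))).items))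

-- ===== PRECONDITION & SPEC =====
def Spec_build_facets_py (flat_assets : List (List (String × String))) (out : List (String × List (String × Int))) : Prop := out = build_facets_py_alt flat_assets
instance (flat_assets : List (List (String × String))) (out : List (String × List (String × Int))) : Decidable (Spec_build_facets_py flat_assets out) := by unfold Spec_build_facets_py; infer_instance

-- ===== CLAIM (what is proved, stated in full; the proofs are below) =====
def Claim_equal_build_facets_py : Prop := ∀ (flat_assets : List (List (String × String))), Dom_build_facets_py flat_assets → Spec_build_facets_py flat_assets (build_facets_py flat_assets)

-- ===== LEMMAS AND PROOFS =====

-- tally continuing from an existing dict (proof-only helper)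
def pvTallyFrom (d : PySem.Dict String Int) (values : List String) : PySem.Dict String Int :=
  values.foldl (fun counts v => counts.insert v (counts.getD v 0 + 1)) d

def pvMkSix (e l f s t u : PySem.Dict String Int) : PySem.Dict String (PySem.Dict String Int) :=
  PySem.Dict.mk [("engines", e), ("licenses", l), ("formats", f), ("sellers", s), ("types", t), ("ue_max", u)]

theorem loop_engines (xs : List String) (e l f s t u : PySem.Dict String Int) :
    xs.foldl (fun fac x => pvBump fac "engines" x) (pvMkSix e l f s t u)
      = pvMkSix (pvTallyFrom e xs) l f s t u := by
  induction xs generalizing e with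
  | nil => rfl
  | cons x xs ih => simpa [pvTallyFrom] using ih (e.insert x (e.getD x 0 + 1))

theorem loop_licenses (xs : List String) (e l f s t u : PySem.Dict String Int) :
    xs.foldl (fun fac x => pvBump fac "licenses" x) (pvMkSix e l f s t u)
      = pvMkSix e (pvTallyFrom l xs) f s t u := by
  induction xs generalizing l with
  | nil => rfl
  | cons x xs ih => simpa [pvTallyFrom] using ih (l.insert x (l.getD x 0 + 1))

theorem loop_formats (xs : List String) (e l f s t u : PySem.Dict String Int) :
    xs.foldl (fun fac x => pvBump fac "formats" x) (pvMkSix e l f s t u)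
      = pvMkSix e l (pvTallyFrom f xs) s t u := by
  induction xs generalizing f with
  | nil => rfl
  | cons x xs ih => simpa [pvTallyFrom] using ih (f.insert x (f.getD x 0 + 1))

theorem stepA_six (asset : List (String × String)) (e l f s t u : PySem.Dict String Int) :
    pvStepA (pvMkSix e l f s t u) asset
      = pvMkSix (pvTallyFrom e (pvExtract asset "engine_versions" true))
          (pvTallyFrom l (pvExtract asset "licenses" true))
          (pvTallyFrom f (pvExtract asset "asset_formats" true))
          (pvTallyFrom s (pvExtract asset "seller_name" false))
          (pvTallyFrom t (pvExtract asset "listing_type" false))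
          (pvTallyFrom u (pvExtract asset "ue_max" false)) := by
  simp only [pvStepA, pvExtract, loop_engines, loop_licenses, loop_formats]
  split_ifs <;> first | exact absurd ‹False› id | rfl

theorem tallyFrom_append (d : PySem.Dict String Int) (xs ys : List String) :
    pvTallyFrom (pvTallyFrom d xs) ys = pvTallyFrom d (xs ++ ys) := by
  simp [pvTallyFrom, List.foldl_append]

theorem foldA_six (assets : List (List (String × String))) (e l f s t u : PySem.Dict String Int) :
    assets.foldl pvStepA (pvMkSix e l f s t u)
      = pvMkSix (pvTallyFrom e (assets.flatMap (fun a => pvExtract a "engine_versions" true)))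
          (pvTallyFrom l (assets.flatMap (fun a => pvExtract a "licenses" true)))
          (pvTallyFrom f (assets.flatMap (fun a => pvExtract a "asset_formats" true)))
          (pvTallyFrom s (assets.flatMap (fun a => pvExtract a "seller_name" false)))
          (pvTallyFrom t (assets.flatMap (fun a => pvExtract a "listing_type" false)))
          (pvTallyFrom u (assets.flatMap (fun a => pvExtract a "ue_max" false))) := by
  induction assets generalizing e l f s t u with
  | nil => simp [pvTallyFrom]
  | cons a as ih =>
      simp only [List.foldl_cons, stepA_six, ih, List.flatMap_cons, tallyFrom_append]

-- ===== VERDICT (by name: the statement is the Claim_ definition above) =====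
theorem build_facets_py_spec : Claim_equal_build_facets_py := by
  intro flat_assets _
  unfold Spec_build_facets_py build_facets_py build_facets_py_alt
  have h := foldA_six flat_assets PySem.Dict.empty PySem.Dict.empty PySem.Dict.empty
    PySem.Dict.empty PySem.Dict.empty PySem.Dict.empty
  rw [show (PySem.Dict.mk [("engines", (PySem.Dict.empty : PySem.Dict String Int)), ("licenses", PySem.Dict.empty),
        ("formats", PySem.Dict.empty), ("sellers", PySem.Dict.empty),
        ("types", PySem.Dict.empty), ("ue_max", PySem.Dict.empty)])
      = pvMkSix PySem.Dict.empty PySem.Dict.empty PySem.Dict.empty PySem.Dict.empty PySem.Dict.empty PySem.Dict.empty from rfl, h]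
  rfl
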